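-- pv_equiv track=rewrite | github.com/HMS-2025/HMS | john.py | generate_full_variants
-- ===== SOURCE A (Python) =====
-- def generate_partial_variants(word):
--     mapping = {'a': '@', 'i': '1', 's': '$', 'o': '0', 'e': '3'}
--     def helper(s):
--         if not s:
--             return [""]
--         first = s[0]
--         rest = s[1:]
--         variants_rest = helper(rest)
--         result = []
--         if first.lower() in mapping:
--             for variant in variants_rest:
--                 result.append(first + variant)
--             replacement = mapping[first.lower()]
--             if first.isupper():
--                 replacement = replacement.upper()
--             for variant in variants_rest:
--                 result.append(replacement + variant)
--         else:
--             for variant in variants_rest: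
--                 result.append(first + variant)
--         return result
--     return list(set(helper(word)))
--
-- def generate_full_variants(word, start_year=2000, end_year=2030):
--     # Base variants with mutations.
--     base_variants = generate_partial_variants(word)
--     # Case variants: the word as-is and with the first letter capitalized.
--     case_variants = set()
--     for variant in base_variants:
--         case_variants.add(variant.lower())
--         case_variants.add(variant.capitalize())
--     full_variants = set(case_variants)
--     # Restricted special characters.
--     special_chars = ["@", "#", "_", "!"]
--     for variant in case_variants:
--         for year in range(start_year, end_year + 1):
--             y = str(year)
--             for special in special_chars:
--                 full_variants.add(variant + y + special)
--                 full_variants.add(y + special + variant)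
--     return list(full_variants)
-- ===== SOURCE B (Python) =====
-- def generate_full_variants(word, start_year=2000, end_year=2030):
--     mapping = {'a': '@', 'i': '1', 's': '$', 'o': '0', 'e': '3'}
--     # Per-character option lists, folded into a cartesian product instead of
--     # A's head/tail recursion over the word.
--     options = []
--     for ch in word:
--         rep = mapping.get(ch.lower())
--         options.append([ch] if rep is None else
--                        [ch, rep.upper() if ch.isupper() else rep])
--     prod = ['']
--     for opts in options:
--         prod = [b + o for b in prod for o in opts]
--     base_variants = set(prod)
--     cased = {x for v in base_variants for x in (v.lower(), v.capitalize())}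
--     years = [str(y) for y in range(start_year, end_year + 1)]
--     full = set(cased)
--     full.update(w for v in cased for y in years for sp in "@#_!"
--                 for w in (v + y + sp, y + sp + v))
--     return list(full)
-- ===== Notes on version B (the rewrite author's own statement) =====
-- stated objective: alternative
-- what changed: Replaces the head/tail recursion of generate_partial_variants by per-character option lists folded into a cartesian product, and replaces the nested add-to-set loops by set comprehensions plus a single set.update over a flat generator; same result, same cost.
import Mathlib
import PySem

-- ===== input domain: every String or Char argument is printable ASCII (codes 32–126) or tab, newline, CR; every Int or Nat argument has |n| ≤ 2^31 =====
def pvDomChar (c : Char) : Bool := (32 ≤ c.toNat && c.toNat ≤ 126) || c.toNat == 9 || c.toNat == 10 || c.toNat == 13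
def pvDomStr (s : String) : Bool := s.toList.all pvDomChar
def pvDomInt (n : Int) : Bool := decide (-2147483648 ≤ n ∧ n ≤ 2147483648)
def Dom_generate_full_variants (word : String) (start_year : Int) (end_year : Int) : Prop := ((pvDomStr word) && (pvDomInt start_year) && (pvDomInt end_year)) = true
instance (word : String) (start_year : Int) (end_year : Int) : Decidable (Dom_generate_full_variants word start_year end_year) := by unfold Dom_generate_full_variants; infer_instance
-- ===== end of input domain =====

-- B replaces A's head/tail recursion over the word by per-character option lists folded
-- into a cartesian product, and builds the case/year/special additions as one flat list
-- with identical set-insertion order (objective: alternative decomposition, same cost);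
-- sets are modelled as PySem.Set (insertion order).

-- the leet mapping {'a':'@','i':'1','s':'$','o':'0','e':'3'} (1-char string keys/values as List Char)
def pvMapping : PySem.Dict (List Char) (List Char) :=
  ((((PySem.Dict.empty.insert ['a'] ['@']).insert ['i'] ['1']).insert ['s'] ['$']).insert ['o'] ['0']).insert ['e'] ['3']

-- str.capitalize(): first char uppercased, the rest lowercased (exact on ASCII)
def pvCapitalize (cs : List Char) : List Char :=
  match cs with
  | [] => []
  | c :: t => PySem.Chars.upperChar c :: PySem.Chars.lower t

-- the four restricted special characters, as 1-char strings
def pvSpecials : List (List Char) := [['@'], ['#'], ['_'], ['!']]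

-- ===== PORT A =====
-- helper(s) of generate_partial_variants
def pvHelperA : List Char → List (List Char)
  | [] => [[]]
  | first :: rest =>
    let variants_rest := pvHelperA rest
    match pvMapping.get? (PySem.Chars.lower [first]) with
    | some repl0 =>
      let replacement := if PySem.Chars.isupper first then PySem.Chars.upper repl0 else repl0
      variants_rest.map (fun v => first :: v) ++ variants_rest.map (fun v => replacement ++ v)
    | none => variants_rest.map (fun v => first :: v)

def generate_full_variants (word : String) (start_year : Int) (end_year : Int) : List String :=
  -- base_variants = generate_partial_variants(word) = list(set(helper(word)))
  let base_variants : PySem.Set (List Char) := PySem.Set.ofList (pvHelperA word.toList)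
  let case_variants : PySem.Set (List Char) :=
    base_variants.foldl
      (fun s v => (PySem.Set.add s (PySem.Chars.lower v)).add (pvCapitalize v))
      PySem.Set.empty
  let full0 : PySem.Set (List Char) := PySem.Set.ofList case_variants
  let full : PySem.Set (List Char) :=
    case_variants.foldl
      (fun f v =>
        (PySem.List.pyRange start_year (end_year + 1) 1).foldl
          (fun f year =>
            let y := PySem.Int.toChars year
            pvSpecials.foldl
              (fun f special => (PySem.Set.add f (v ++ y ++ special)).add (y ++ special ++ v))
              f)
          f)
      full0
  full.map String.ofList

-- ===== PORT B =====
def generate_full_variants_alt (word : String) (start_year : Int) (end_year : Int) : List String :=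
  let options : List (List (List Char)) :=
    word.toList.map (fun ch =>
      match pvMapping.get? (PySem.Chars.lower [ch]) with
      | none => [[ch]]
      | some rep => [[ch], if PySem.Chars.isupper ch then PySem.Chars.upper rep else rep])
  let prod : List (List Char) :=
    options.foldl (fun bs opts => bs.flatMap (fun b => opts.map (fun o => b ++ o))) [[]]
  let base_variants : PySem.Set (List Char) := PySem.Set.ofList prod
  let cased : PySem.Set (List Char) :=
    PySem.Set.ofList (base_variants.flatMap (fun v => [PySem.Chars.lower v, pvCapitalize v]))
  let years : List (List Char) :=
    (PySem.List.pyRange start_year (end_year + 1) 1).map PySem.Int.toChars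
  let extras : List (List Char) :=
    cased.flatMap (fun v => years.flatMap (fun y =>
      pvSpecials.flatMap (fun sp => [v ++ y ++ sp, y ++ sp ++ v])))
  let full : PySem.Set (List Char) := PySem.Set.update (PySem.Set.ofList cased) extras
  full.map String.ofList

-- ===== PRECONDITION & SPEC =====
def Spec_generate_full_variants (word : String) (start_year : Int) (end_year : Int) (out : List String) : Prop := out = generate_full_variants_alt word start_year end_year
instance (word : String) (start_year : Int) (end_year : Int) (out : List String) : Decidable (Spec_generate_full_variants word start_year end_year out) := by unfold Spec_generate_full_variants; infer_instance

-- ===== CLAIM (what is proved, stated in full; the proofs are below) =====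
def Claim_equal_generate_full_variants : Prop := ∀ (word : String) (start_year : Int) (end_year : Int), Dom_generate_full_variants word start_year end_year → Spec_generate_full_variants word start_year end_year (generate_full_variants word start_year end_year)

-- ===== LEMMAS AND PROOFS =====

-- A's recursion step is a flatMap over the per-character option list.
theorem pvHelperA_cons (c : Char) (cs : List Char) :
    pvHelperA (c :: cs) =
      (match pvMapping.get? (PySem.Chars.lower [c]) with
        | none => [[c]]
        | some rep => [[c], if PySem.Chars.isupper c then PySem.Chars.upper rep else rep]).flatMap
        (fun o => (pvHelperA cs).map (fun v => o ++ v)) := by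
  cases h : pvMapping.get? (PySem.Chars.lower [c]) <;>
    simp [pvHelperA, h]

-- the product fold equals A's recursion (accumulator-generalized)
theorem pvProd_eq_helperA (cs : List Char) (acc : List (List Char))
    (opts : Char → List (List Char))
    (hopts : ∀ c, opts c =
      (match pvMapping.get? (PySem.Chars.lower [c]) with
        | none => [[c]]
        | some rep => [[c], if PySem.Chars.isupper c then PySem.Chars.upper rep else rep])) :
    (cs.map opts).foldl (fun bs o => bs.flatMap (fun b => o.map (fun x => b ++ x))) acc =
      acc.flatMap (fun b => (pvHelperA cs).map (fun v => b ++ v)) := by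
  induction cs generalizing acc with
  | nil => simp [pvHelperA]
  | cons c cs ih =>
    simp only [List.map_cons, List.foldl_cons]
    rw [ih]
    rw [pvHelperA_cons, hopts c]
    simp [List.flatMap_map, List.map_flatMap, List.flatMap_assoc, List.map_map,
      Function.comp_def, List.append_assoc]

-- a loop doing two adds per element is Set.update with the paired flatMap
theorem pvFoldl_add2_eq_update {α β : Type} [BEq α] (f g : β → α) (l : List β) (s : PySem.Set α) :
    l.foldl (fun s v => (PySem.Set.add s (f v)).add (g v)) s =
      PySem.Set.update s (l.flatMap (fun v => [f v, g v])) := by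
  induction l generalizing s with
  | nil => rfl
  | cons x t ih => simp [List.foldl_cons, ih, PySem.Set.update]

-- a loop doing Set.update per element is Set.update with the flatMap
theorem pvFoldl_update_eq_update {α β : Type} [BEq α] (g : β → List α) (l : List β) (s : PySem.Set α) :
    l.foldl (fun s v => PySem.Set.update s (g v)) s = PySem.Set.update s (l.flatMap g) := by
  induction l generalizing s with
  | nil => rfl
  | cons x t ih => simp [List.foldl_cons, ih, PySem.Set.update_append]

-- ===== VERDICT (by name: the statement is the Claim_ definition above) =====
theorem generate_full_variants_spec : Claim_equal_generate_full_variants := by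
  intro word start_year end_year _
  show generate_full_variants word start_year end_year
      = generate_full_variants_alt word start_year end_year
  unfold generate_full_variants generate_full_variants_alt
  dsimp only []
  rw [pvProd_eq_helperA word.toList [[]] _ (fun c => rfl)]
  simp only [List.flatMap_cons, List.flatMap_nil, List.nil_append, List.append_nil]
  rw [pvFoldl_add2_eq_update PySem.Chars.lower pvCapitalize]
  have hinner :
      (fun (f : PySem.Set (List Char)) (v : List Char) =>
        (PySem.List.pyRange start_year (end_year + 1) 1).foldl
          (fun f year =>
            let y := PySem.Int.toChars year
            pvSpecials.foldl
              (fun f special => (PySem.Set.add f (v ++ y ++ special)).add (y ++ special ++ v))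
              f)
          f)
      = (fun f v => PySem.Set.update f
          ((PySem.List.pyRange start_year (end_year + 1) 1).flatMap (fun year =>
            pvSpecials.flatMap (fun sp =>
              [v ++ PySem.Int.toChars year ++ sp, PySem.Int.toChars year ++ sp ++ v])))) := by
    funext f v
    rw [← pvFoldl_update_eq_update]
    simp only [pvFoldl_add2_eq_update]
  rw [hinner, pvFoldl_update_eq_update]
  simp [PySem.Set.update, PySem.Set.ofList_eq_foldl, List.flatMap_map]
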